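-- pv_equiv track=rewrite | github.com/lewtucker/policy-maker | src/server/server.py | _resolve_caller
-- ===== SOURCE A (Python) =====
-- def _resolve_caller(caller_id: str, people: list) -> dict | None:
--     """
--     Match caller_id against the people roster using multiple strategies, in order:
--     1. Exact telegram_id match      e.g. "tg:6741893378"
--     2. person_id match              e.g. "lew"
--     3. Full name match              e.g. "Lew Tucker"
--     4. First word of name match     e.g. "Lew"
--     All name/id comparisons are case-insensitive.
--     """
--     needle = caller_id.strip().lower()
--
--     # 1. Telegram ID (exact)
--     for p in people:
--         if p.get("telegram_id", "").lower() == needle: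
--             return p
--
--     # 2. Person ID
--     for p in people:
--         if p.get("person_id", "").strip().lower() == needle:
--             return p
--
--     # 3. Full name
--     for p in people:
--         if p.get("name", "").strip().lower() == needle:
--             return p
--
--     # 4. First word of name
--     for p in people:
--         first = p.get("name", "").strip().lower().split()[0] if p.get("name") else ""
--         if first and first == needle:
--             return p
--
--     return None
-- ===== SOURCE B (Python) =====
-- def _resolve_caller(caller_id: str, people: list) -> dict | None:
--     """Index the roster once, then do prioritized O(1) lookups."""
--     needle = caller_id.strip().lower()
--     by_telegram, by_person_id, by_name, by_first = {}, {}, {}, {}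
--     for p in people:
--         by_telegram.setdefault(p.get("telegram_id", "").lower(), p)
--         by_person_id.setdefault(p.get("person_id", "").strip().lower(), p)
--         name = p.get("name", "").strip().lower()
--         by_name.setdefault(name, p)
--         words = name.split()
--         if words:
--             by_first.setdefault(words[0], p)
--     for index in (by_telegram, by_person_id, by_name, by_first):
--         match = index.get(needle)
--         if match is not None:
--             return match
--     return None
-- ===== Notes on version B (the rewrite author's own statement) =====
-- stated objective: alternative
-- what changed: Replaces A's four sequential roster scans with a single pass that builds four first-write-wins dictionaries (telegram id, person id, full name, first word of name) followed by prioritized dictionary lookups.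
import Mathlib
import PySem

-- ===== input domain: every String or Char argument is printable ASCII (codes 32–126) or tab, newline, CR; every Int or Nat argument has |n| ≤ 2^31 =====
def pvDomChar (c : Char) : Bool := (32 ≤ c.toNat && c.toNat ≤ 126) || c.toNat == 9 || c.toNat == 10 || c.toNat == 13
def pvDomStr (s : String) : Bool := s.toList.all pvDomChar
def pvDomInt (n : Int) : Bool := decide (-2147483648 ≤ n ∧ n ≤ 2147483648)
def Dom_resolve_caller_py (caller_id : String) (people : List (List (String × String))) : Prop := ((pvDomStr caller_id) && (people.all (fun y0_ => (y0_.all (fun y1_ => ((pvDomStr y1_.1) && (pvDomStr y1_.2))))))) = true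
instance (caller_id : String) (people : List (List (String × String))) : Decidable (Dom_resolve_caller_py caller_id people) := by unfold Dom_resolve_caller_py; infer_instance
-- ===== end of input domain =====

-- B replaces A's four sequential roster scans by one pass that builds four first-write-wins
-- indexes (telegram id, person id, full name, first word of name) followed by prioritized
-- lookups — an alternative structure, not claimed faster.

-- p.get(k, dflt) on a person dict (both Pythons call it identically)
def pvGetD (p : List (String × String)) (k dflt : String) : String :=
  (PySem.Dict.ofList p).getD k dflt

-- ===== PORT A =====
def resolve_caller_py (caller_id : String) (people : List (List (String × String))) : Option (List (String × String)) :=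
  let needle := PySem.Str.lower (PySem.Str.strip caller_id)
  -- 1. Telegram ID (exact)
  match people.find? (fun p => PySem.Str.lower (pvGetD p "telegram_id" "") == needle) with
  | some p => some p
  | none =>
  -- 2. Person ID
  match people.find? (fun p => PySem.Str.lower (PySem.Str.strip (pvGetD p "person_id" "")) == needle) with
  | some p => some p
  | none =>
  -- 3. Full name
  match people.find? (fun p => PySem.Str.lower (PySem.Str.strip (pvGetD p "name" "")) == needle) with
  | some p => some p
  | none =>
  -- 4. First word of name.  Python computes split()[0], an IndexError when the split is
  -- empty; Pre_ excludes exactly those rosters, so head?.getD "" is exact on Pre_.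
  match people.find? (fun p =>
      let first := if pvGetD p "name" "" ≠ "" then
          ((PySem.Str.split₀ (PySem.Str.lower (PySem.Str.strip (pvGetD p "name" "")))).head?).getD ""
        else ""
      (first != "") && (first == needle)) with
  | some p => some p
  | none => none

-- ===== PORT B =====
def resolve_caller_py_alt (caller_id : String) (people : List (List (String × String))) : Option (List (String × String)) :=
  let needle := PySem.Str.lower (PySem.Str.strip caller_id)
  let idx := people.foldl
    (fun (t : PySem.Dict String (List (String × String)) × PySem.Dict String (List (String × String)) × PySem.Dict String (List (String × String)) × PySem.Dict String (List (String × String))) p =>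
      let name := PySem.Str.lower (PySem.Str.strip (pvGetD p "name" ""))
      ( t.1.setdefault (PySem.Str.lower (pvGetD p "telegram_id" "")) p,
        t.2.1.setdefault (PySem.Str.lower (PySem.Str.strip (pvGetD p "person_id" ""))) p,
        t.2.2.1.setdefault name p,
        match PySem.Str.split₀ name with
        | [] => t.2.2.2
        | w :: _ => t.2.2.2.setdefault w p))
    (PySem.Dict.empty, PySem.Dict.empty, PySem.Dict.empty, PySem.Dict.empty)
  -- return the first index hit, in priority order
  (idx.1.get? needle).or ((idx.2.1.get? needle).or ((idx.2.2.1.get? needle).or (idx.2.2.2.get? needle)))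

-- ===== PRECONDITION & SPEC =====
-- Pre_ excludes rosters containing a person whose name is nonempty but consists only of
-- whitespace: on such inputs A's strategy-4 line 'name.strip().lower().split()[0]' raises
-- IndexError whenever that loop is reached (on some of them A still returns via an earlier
-- strategy; they are excluded wholesale because the raising condition depends on the needle).
def Pre_resolve_caller_py (caller_id : String) (people : List (List (String × String))) : Prop :=
  ∀ p ∈ people, pvGetD p "name" "" ≠ "" →
    PySem.Str.split₀ (PySem.Str.lower (PySem.Str.strip (pvGetD p "name" ""))) ≠ []
instance (caller_id : String) (people : List (List (String × String))) : Decidable (Pre_resolve_caller_py caller_id people) := by unfold Pre_resolve_caller_py; infer_instance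

def pvWitness_resolve_caller_py : String × (List (List (String × String))) :=
  ("Lew", [[("person_id", "lew"), ("name", "Lew Tucker")]])

def Spec_resolve_caller_py (caller_id : String) (people : List (List (String × String))) (out : Option (List (String × String))) : Prop := out = resolve_caller_py_alt caller_id people
instance (caller_id : String) (people : List (List (String × String))) (out : Option (List (String × String))) : Decidable (Spec_resolve_caller_py caller_id people out) := by unfold Spec_resolve_caller_py; infer_instance

-- ===== CLAIM (what is proved, stated in full; the proofs are below) =====
def Claim_equal_resolve_caller_py : Prop := ∀ (caller_id : String) (people : List (List (String × String))), Dom_resolve_caller_py caller_id people → Pre_resolve_caller_py caller_id people → Spec_resolve_caller_py caller_id people (resolve_caller_py caller_id people)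

-- ===== LEMMAS AND PROOFS =====

-- the optional key of each of B's four indexes, and the generic setdefault loop shape
def pvKeyTG (p : List (String × String)) : Option String :=
  some (PySem.Str.lower (pvGetD p "telegram_id" ""))
def pvKeyPID (p : List (String × String)) : Option String :=
  some (PySem.Str.lower (PySem.Str.strip (pvGetD p "person_id" "")))
def pvKeyName (p : List (String × String)) : Option String :=
  some (PySem.Str.lower (PySem.Str.strip (pvGetD p "name" "")))
def pvKeyFirst (p : List (String × String)) : Option String :=
  (PySem.Str.split₀ (PySem.Str.lower (PySem.Str.strip (pvGetD p "name" "")))).head?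
def pvStep {α : Type} (kf : α → Option String) (d : PySem.Dict String α) (p : α) : PySem.Dict String α :=
  match kf p with
  | none => d
  | some k => d.setdefault k p

-- lookup in a first-write-wins (setdefault) index = first scan hit
theorem pv_get?_foldl_setdefault {α : Type} (kf : α → Option String) (x : String) :
    ∀ (ps : List α) (d : PySem.Dict String α),
    (ps.foldl (pvStep kf) d).get? x = (d.get? x).or (ps.find? (fun p => kf p == some x)) := by
  intro ps
  induction ps with
  | nil => intro d; simp [List.find?]
  | cons p ps ih =>
    intro d
    simp only [List.foldl_cons, List.find?]
    cases hk : kf p with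
    | none => rw [show pvStep kf d p = d by simp [pvStep, hk], ih]; simp
    | some k =>
      rw [show pvStep kf d p = d.setdefault k p by simp [pvStep, hk]]
      by_cases hx : k = x
      · subst hx
        simp only [beq_self_eq_true]
        by_cases hc : (d.contains k : Bool)
        · rw [PySem.Dict.setdefault_of_contains (h := hc), ih]
          have hs : (d.get? k).isSome := by rw [← PySem.Dict.contains_eq_isSome_get?]; exact hc
          cases hg : d.get? k with
          | none => rw [hg] at hs; simp at hs
          | some v => simp
        · rw [PySem.Dict.setdefault_of_not_contains (h := by simpa using hc), ih]
          have hg : d.get? k = none := by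
            rw [PySem.Dict.get?_eq_none_iff_contains]; simpa using hc
          rw [PySem.Dict.get?_insert_self, hg]
          simp
      · have hbx : (some k == some x) = false := by simp [hx]
        rw [hbx]
        by_cases hc : (d.contains k : Bool)
        · rw [PySem.Dict.setdefault_of_contains (h := hc), ih]
        · rw [PySem.Dict.setdefault_of_not_contains (h := by simpa using hc), ih,
              PySem.Dict.get?_insert_of_ne (hne := Ne.symm hx)]

-- B's one-pass fold over the 4-tuple is the 4 independent setdefault folds
theorem pv_proj4 :
    ∀ (ps : List (List (String × String)))
      (d1 d2 d3 d4 : PySem.Dict String (List (String × String))),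
    ps.foldl
      (fun t p =>
        let name := PySem.Str.lower (PySem.Str.strip (pvGetD p "name" ""))
        ( t.1.setdefault (PySem.Str.lower (pvGetD p "telegram_id" "")) p,
          t.2.1.setdefault (PySem.Str.lower (PySem.Str.strip (pvGetD p "person_id" ""))) p,
          t.2.2.1.setdefault name p,
          match PySem.Str.split₀ name with
          | [] => t.2.2.2
          | w :: _ => t.2.2.2.setdefault w p))
      (d1, d2, d3, d4)
    = (ps.foldl (pvStep pvKeyTG) d1, ps.foldl (pvStep pvKeyPID) d2,
       ps.foldl (pvStep pvKeyName) d3, ps.foldl (pvStep pvKeyFirst) d4) := by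
  intro ps
  induction ps with
  | nil => intro d1 d2 d3 d4; rfl
  | cons p ps ih =>
    intro d1 d2 d3 d4
    simp only [List.foldl_cons]
    rw [ih]
    cases h : PySem.Str.split₀ (PySem.Str.lower (PySem.Str.strip (pvGetD p "name" ""))) with
    | nil => simp [pvStep, pvKeyTG, pvKeyPID, pvKeyName, pvKeyFirst, h]
    | cons w ws => simp [pvStep, pvKeyTG, pvKeyPID, pvKeyName, pvKeyFirst, h]

theorem pv_find?_congr_mem {α : Type} (l : List α) (p q : α → Bool)
    (h : ∀ a ∈ l, p a = q a) : l.find? p = l.find? q := by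
  induction l with
  | nil => rfl
  | cons a l ih =>
    simp only [List.find?]
    rw [h a (by simp)]
    cases q a
    · exact ih (fun b hb => h b (by simp [hb]))
    · rfl

-- every word str.split() produces is nonempty
theorem pv_split0_go_ne : ∀ (s cur : List Char) (acc : List (List Char)),
    (∀ w ∈ acc, w ≠ []) → ∀ w ∈ PySem.Chars.split₀.go s cur acc, w ≠ [] := by
  intro s
  induction s with
  | nil =>
    intro cur acc hacc w hw
    simp only [PySem.Chars.split₀.go] at hw
    split at hw
    · exact hacc w (by simpa using hw)
    · next hcur =>
      rcases (by simpa using hw : w ∈ acc ∨ w = cur.reverse) with h3 | h3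
      · exact hacc _ h3
      · subst h3; simp [List.isEmpty_iff] at hcur; simpa using hcur
  | cons c rest ih =>
    intro cur acc hacc w hw
    simp only [PySem.Chars.split₀.go] at hw
    split at hw
    · split at hw
      · exact ih _ _ hacc w hw
      · next hcur =>
        refine ih _ _ ?_ w hw
        intro u hu
        rcases List.mem_cons.mp hu with h3 | h3
        · subst h3; simp [List.isEmpty_iff] at hcur; simpa using hcur
        · exact hacc _ h3
    · exact ih _ _ hacc w hw

theorem pv_split0_ne_empty (s : String) : ∀ w ∈ PySem.Str.split₀ s, w ≠ "" := by
  intro w hw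
  simp only [PySem.Str.split₀, List.mem_map] at hw
  obtain ⟨l, hl, rfl⟩ := hw
  have hne : l ≠ [] := pv_split0_go_ne _ _ _ (by simp) l hl
  intro hcon
  apply hne
  simpa using congrArg String.toList hcon

-- ===== VERDICT (by name: the statement is the Claim_ definition above) =====
theorem resolve_caller_py_spec : Claim_equal_resolve_caller_py := by
  intro caller_id people _ hpre
  unfold Spec_resolve_caller_py
  unfold resolve_caller_py resolve_caller_py_alt
  rw [pv_proj4]
  dsimp only
  rw [pv_get?_foldl_setdefault, pv_get?_foldl_setdefault, pv_get?_foldl_setdefault,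
      pv_get?_foldl_setdefault]
  simp only [PySem.Dict.get?_empty, Option.none_or]
  -- align the four scans
  set needle := PySem.Str.lower (PySem.Str.strip caller_id) with hn
  have e1 : people.find? (fun p => PySem.Str.lower (pvGetD p "telegram_id" "") == needle)
      = people.find? (fun p => pvKeyTG p == some needle) := by
    refine pv_find?_congr_mem _ _ _ (fun p _ => ?_)
    simp [pvKeyTG]
  have e2 : people.find? (fun p => PySem.Str.lower (PySem.Str.strip (pvGetD p "person_id" "")) == needle)
      = people.find? (fun p => pvKeyPID p == some needle) := by
    refine pv_find?_congr_mem _ _ _ (fun p _ => ?_)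
    simp [pvKeyPID]
  have e3 : people.find? (fun p => PySem.Str.lower (PySem.Str.strip (pvGetD p "name" "")) == needle)
      = people.find? (fun p => pvKeyName p == some needle) := by
    refine pv_find?_congr_mem _ _ _ (fun p _ => ?_)
    simp [pvKeyName]
  have e4 : people.find? (fun p =>
        let first := if pvGetD p "name" "" ≠ "" then
            ((PySem.Str.split₀ (PySem.Str.lower (PySem.Str.strip (pvGetD p "name" "")))).head?).getD ""
          else ""
        (first != "") && (first == needle))
      = people.find? (fun p => pvKeyFirst p == some needle) := by
    refine pv_find?_congr_mem _ _ _ (fun p hp => ?_)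
    by_cases hname : pvGetD p "name" "" = ""
    · simp only [hname]
      have : PySem.Str.split₀ (PySem.Str.lower (PySem.Str.strip "")) = [] := by decide
      simp [pvKeyFirst, hname, this]
    · have hw := hpre p hp hname
      cases hws : PySem.Str.split₀ (PySem.Str.lower (PySem.Str.strip (pvGetD p "name" ""))) with
      | nil => exact absurd hws hw
      | cons w ws =>
        have hwne : w ≠ "" := pv_split0_ne_empty _ w (by rw [hws]; simp)
        simp [pvKeyFirst, hws, hname, hwne]
  rw [e1, e2, e3, e4]
  cases people.find? (fun p => pvKeyTG p == some needle) with
  | some p => rfl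
  | none =>
    cases people.find? (fun p => pvKeyPID p == some needle) with
    | some p => rfl
    | none =>
      cases people.find? (fun p => pvKeyName p == some needle) with
      | some p => rfl
      | none =>
        cases people.find? (fun p => pvKeyFirst p == some needle) with
        | some p => rfl
        | none => rfl
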